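-- pv_equiv track=rewrite | github.com/zeiger2/Cem2_Lab2_AuCD | AuCD_Cem2_Lab2/AuCD_Cem2_Lab2.py | decode_huffman_dc
-- ===== SOURCE A (Python) =====
-- DC_LUMA_HUFFMAN = {
--     0: '00',
--     1: '010',
--     2: '011',
--     3: '100',
--     4: '101',
--     5: '110',
--     6: '1110',
--     7: '11110',
--     8: '111110',
--     9: '1111110',
--     10: '11111110',
--     11: '111111110'
-- }
--
-- DC_CHROM_HUFFMAN = {
--     0: '00',
--     1: '01',
--     2: '10',
--     3: '110',
--     4: '1110',
--     5: '11110',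
--     6: '111110',
--     7: '1111110',
--     8: '11111110',
--     9: '111111110',
--     10: '1111111110',
--     11: '11111111110'
-- }
--
-- def decode_huffman_dc(bitstream, flag):
--     huffman_table = DC_LUMA_HUFFMAN if flag == 0 else DC_CHROM_HUFFMAN
--
--     code = ''
--     for bit in bitstream:
--         code += bit
--         for key, value in huffman_table.items():
--             if value == code:
--                 remaining_bits = bitstream[len(code):]
--                 return key, remaining_bits
--     raise ValueError("Неверный DC Huffman код")
-- ===== SOURCE B (Python) =====
-- def decode_huffman_dc(bitstream, flag):
--     # closed-form decoder: both tables are "r leading ones then a 0" codes with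
--     # a few short special cases, so the key is computed arithmetically from r.
--     def bit(i):
--         return bitstream[i] if i < len(bitstream) else None
--
--     r = 0
--     while bit(r) == '1':
--         r += 1
--
--     key = None
--     if flag == 0:
--         if bit(0) == '0':
--             if bit(1) == '0':
--                 key, used = 0, 2
--             elif bit(1) == '1':
--                 if bit(2) == '0':
--                     key, used = 1, 3
--                 elif bit(2) == '1':
--                     key, used = 2, 3
--         elif r == 1 and bit(1) == '0':
--             if bit(2) == '0':
--                 key, used = 3, 3
--             elif bit(2) == '1':
--                 key, used = 4, 3
--         elif 2 <= r <= 8 and bit(r) == '0':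
--             key, used = r + 3, r + 1
--     else:
--         if bit(0) == '0':
--             if bit(1) == '0':
--                 key, used = 0, 2
--             elif bit(1) == '1':
--                 key, used = 1, 2
--         elif 1 <= r <= 10 and bit(r) == '0':
--             key, used = (2 if r == 1 else r + 1), r + 1
--
--     if key is None:
--         raise ValueError("Неверный DC Huffman код")
--     return key, bitstream[used:]
-- ===== Notes on version B (the rewrite author's own statement) =====
-- stated objective: alternative
-- what changed: Replaces A's prefix-accumulation with a rescan of the whole Huffman table after every bit by a closed-form arithmetic decoder: count the leading '1' bits and compute the key directly from that count (both tables are comma codes with a few short special cases), no table at runtime.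
import Mathlib
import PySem

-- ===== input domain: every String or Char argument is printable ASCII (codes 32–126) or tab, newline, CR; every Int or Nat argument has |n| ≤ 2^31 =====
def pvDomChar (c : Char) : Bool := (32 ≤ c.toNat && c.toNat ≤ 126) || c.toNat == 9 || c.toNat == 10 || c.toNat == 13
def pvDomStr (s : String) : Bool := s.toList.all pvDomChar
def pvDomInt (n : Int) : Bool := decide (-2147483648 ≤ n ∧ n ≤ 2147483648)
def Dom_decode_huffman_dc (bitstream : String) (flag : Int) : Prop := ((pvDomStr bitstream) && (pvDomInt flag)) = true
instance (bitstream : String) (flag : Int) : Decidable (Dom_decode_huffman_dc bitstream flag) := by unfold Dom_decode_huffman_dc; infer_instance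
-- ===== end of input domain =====

-- B decodes the code arithmetically from the number of leading '1' bits (both tables are
-- comma codes with a few short special cases) instead of A's rescan of the table per bit.

-- ===== PORT A =====
-- the two Python dicts; codes (Python bit-strings, '0'/'1' only) are kept as their char lists
def lumaTable : List (Int × List Char) :=
  [(0, ['0','0']), (1, ['0','1','0']), (2, ['0','1','1']), (3, ['1','0','0']),
   (4, ['1','0','1']), (5, ['1','1','0']), (6, ['1','1','1','0']), (7, ['1','1','1','1','0']),
   (8, ['1','1','1','1','1','0']), (9, ['1','1','1','1','1','1','0']),
   (10, ['1','1','1','1','1','1','1','0']), (11, ['1','1','1','1','1','1','1','1','0'])]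

def chromTable : List (Int × List Char) :=
  [(0, ['0','0']), (1, ['0','1']), (2, ['1','0']), (3, ['1','1','0']),
   (4, ['1','1','1','0']), (5, ['1','1','1','1','0']), (6, ['1','1','1','1','1','0']),
   (7, ['1','1','1','1','1','1','0']), (8, ['1','1','1','1','1','1','1','0']),
   (9, ['1','1','1','1','1','1','1','1','0']), (10, ['1','1','1','1','1','1','1','1','1','0']),
   (11, ['1','1','1','1','1','1','1','1','1','1','0'])]

-- A's outer loop: accumulate code, scan the table (insertion order = first match) after each bit;
-- 'bitstream[len(code):]' is a nonnegative slice = drop.  none = the final 'raise ValueError'.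
def aLoop (table : List (Int × List Char)) (full : List Char) (code : List Char) :
    List Char → Option (Int × String)
  | [] => none
  | b :: rest =>
      let code' := code ++ [b]
      match table.find? (fun kv => kv.2 == code') with
      | some kv => some (kv.1, String.mk (full.drop code'.length))
      | none => aLoop table full code' rest

def decode_huffman_dc (bitstream : String) (flag : Int) : Int × String :=
  let table := if flag == 0 then lumaTable else chromTable
  match aLoop table bitstream.toList [] bitstream.toList with
  | some r => r
  | none => (0, "")   -- Python raises ValueError here; excluded by Pre_

-- ===== PORT B =====
-- B's while loop: number of leading '1' characters
def leadOnes : List Char → Nat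
  | [] => 0
  | c :: rest => if c = '1' then leadOnes rest + 1 else 0

-- B's decision table: some (key, used) or none (= raise ValueError); bit i = l[]?i
def bDecide (l : List Char) (flag : Int) : Option (Int × Nat) :=
  let r := leadOnes l
  if flag == 0 then
    if l[0]? = some '0' then
      if l[1]? = some '0' then some (0, 2)
      else if l[1]? = some '1' then
        if l[2]? = some '0' then some (1, 3)
        else if l[2]? = some '1' then some (2, 3)
        else none
      else none
    else if r = 1 then
      if l[1]? = some '0' then
        if l[2]? = some '0' then some (3, 3)
        else if l[2]? = some '1' then some (4, 3)
        else none
      else none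
    else if 2 ≤ r ∧ r ≤ 8 then
      if l[r]? = some '0' then some ((r : Int) + 3, r + 1) else none
    else none
  else
    if l[0]? = some '0' then
      if l[1]? = some '0' then some (0, 2)
      else if l[1]? = some '1' then some (1, 2)
      else none
    else if 1 ≤ r ∧ r ≤ 10 then
      if l[r]? = some '0' then
        some (if r = 1 then 2 else (r : Int) + 1, r + 1)
      else none
    else none

def decode_huffman_dc_alt (bitstream : String) (flag : Int) : Int × String :=
  let l := bitstream.toList
  match bDecide l flag with
  | some (k, used) => (k, String.mk (l.drop used))
  | none => (0, "")   -- Python raises ValueError here; excluded by Pre_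

-- ===== PRECONDITION & SPEC =====
-- A raises ValueError exactly when no code of the selected table is a prefix of the bitstream;
-- Pre_ excludes precisely those inputs (B raises the same error there).
def Pre_decode_huffman_dc (bitstream : String) (flag : Int) : Prop :=
  ∃ kv ∈ (if flag == 0 then lumaTable else chromTable), kv.2 <+: bitstream.toList

instance (bitstream : String) (flag : Int) : Decidable (Pre_decode_huffman_dc bitstream flag) := by
  unfold Pre_decode_huffman_dc; infer_instance

def pvWitness_decode_huffman_dc : String × Int := ("0101", 0)

def Spec_decode_huffman_dc (bitstream : String) (flag : Int) (out : Int × String) : Prop :=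
  out = decode_huffman_dc_alt bitstream flag
instance (bitstream : String) (flag : Int) (out : Int × String) :
    Decidable (Spec_decode_huffman_dc bitstream flag out) := by
  unfold Spec_decode_huffman_dc; infer_instance

-- ===== CLAIM (what is proved, stated in full; the proofs are below) =====
def Claim_equal_decode_huffman_dc : Prop :=
  ∀ (bitstream : String) (flag : Int), Dom_decode_huffman_dc bitstream flag →
    Pre_decode_huffman_dc bitstream flag →
    Spec_decode_huffman_dc bitstream flag (decode_huffman_dc bitstream flag)

-- ===== LEMMAS AND PROOFS =====

-- ===== VERDICT (by name: the statement is the Claim_ definition above) =====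
theorem decode_huffman_dc_spec : Claim_equal_decode_huffman_dc := by
  intro bs flag _ hpre
  unfold Spec_decode_huffman_dc
  obtain ⟨kv, hmem, t, ht⟩ := hpre
  unfold decode_huffman_dc decode_huffman_dc_alt
  by_cases hf : flag = 0 <;>
    simp only [hf, beq_iff_eq, ite_true, ite_false] at hmem ⊢ <;>
    first
    | (simp only [lumaTable, List.mem_cons, List.not_mem_nil, or_false] at hmem
       rcases hmem with rfl|rfl|rfl|rfl|rfl|rfl|rfl|rfl|rfl|rfl|rfl|rfl <;>
         (rw [← ht]; simp [aLoop, bDecide, leadOnes, lumaTable]))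
    | (simp only [chromTable, List.mem_cons, List.not_mem_nil, or_false] at hmem
       rcases hmem with rfl|rfl|rfl|rfl|rfl|rfl|rfl|rfl|rfl|rfl|rfl|rfl <;>
         (rw [← ht]; simp [hf, aLoop, bDecide, leadOnes, chromTable]))
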